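-- pv_equiv track=rewrite | github.com/Aryan41211/Nyaysaathi | backend/ai_engine/semantic_search.py | keyword_backup_category
-- ===== SOURCE A (Python) =====
-- def keyword_backup_category(query: str, categories: list[str]) -> str:
--     """Simple keyword backup category scoring for hybrid behavior."""
--     q_tokens = set(str(query).lower().split())
--     best = ""
--     best_score = 0
--     for cat in categories:
--         tokens = set(cat.lower().split())
--         score = len(q_tokens & tokens)
--         if score > best_score:
--             best = cat
--             best_score = score
--     return best if best_score > 0 else ""
-- ===== SOURCE B (Python) =====
-- def keyword_backup_category(query: str, categories: list[str]) -> str: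
--     """Inverted-index scatter scoring: build a token -> posting-list index over
--     the categories once, accumulate per-category scores by scattering from the
--     query tokens, then scan for the first strictly-best positive score."""
--     index = {}
--     for i, cat in enumerate(categories):
--         for t in set(cat.lower().split()):
--             index.setdefault(t, []).append(i)
--     scores = [0] * len(categories)
--     for t in set(str(query).lower().split()):
--         for i in index.get(t, []):
--             scores[i] += 1
--     best_i = -1
--     best_score = 0
--     for i, s in enumerate(scores):
--         if s > best_score:
--             best_i, best_score = i, s
--     return categories[best_i] if best_score > 0 else ""
-- ===== Notes on version B (the rewrite author's own statement) =====
-- stated objective: alternative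
-- what changed: Replaces A's per-category set-intersection scoring fold by an inverted index: one pass over categories builds a token->posting-list dict, query tokens scatter increments into a score array through the postings, and a final indexed scan picks the first strictly-best positive score.
import Mathlib
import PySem

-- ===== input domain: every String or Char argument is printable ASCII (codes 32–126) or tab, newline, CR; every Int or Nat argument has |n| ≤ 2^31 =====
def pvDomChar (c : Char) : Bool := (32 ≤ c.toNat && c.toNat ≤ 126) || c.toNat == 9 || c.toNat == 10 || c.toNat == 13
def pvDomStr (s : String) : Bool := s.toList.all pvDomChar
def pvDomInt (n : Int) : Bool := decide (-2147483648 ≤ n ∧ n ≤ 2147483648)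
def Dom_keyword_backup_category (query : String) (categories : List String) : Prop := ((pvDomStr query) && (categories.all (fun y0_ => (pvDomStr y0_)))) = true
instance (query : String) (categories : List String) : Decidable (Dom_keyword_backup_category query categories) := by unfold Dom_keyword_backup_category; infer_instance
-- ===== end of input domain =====

-- B replaces A's per-category set-intersection fold by an inverted token index,
-- scatter-accumulated scores and an indexed final scan (objective: alternative).

-- ===== PORT A =====
def keyword_backup_category (query : String) (categories : List String) : String :=
  let q_tokens : PySem.Set String := PySem.Set.ofList (PySem.Str.split₀ (PySem.Str.lower query))
  let r := categories.foldl (fun (acc : String × Int) cat =>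
    let tokens : PySem.Set String := PySem.Set.ofList (PySem.Str.split₀ (PySem.Str.lower cat))
    let score : Int := PySem.Set.len (PySem.Set.inter q_tokens tokens)
    if score > acc.2 then (cat, score) else acc) ("", 0)
  if r.2 > 0 then r.1 else ""

-- ===== PORT B =====
-- index.setdefault(t, []).append(i) is exactly d[t] = d.get(t, []) + [i], i.e. Dict.modify t [] (· ++ [i]).
def keyword_backup_category_alt (query : String) (categories : List String) : String :=
  let index : PySem.Dict String (List Int) :=
    (PySem.List.enumerate categories 0).foldl (fun d p =>
      (PySem.Set.ofList (PySem.Str.split₀ (PySem.Str.lower p.2))).foldl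
        (fun d t => d.modify t [] (· ++ [p.1])) d) PySem.Dict.empty
  let scores : List Int :=
    (PySem.Set.ofList (PySem.Str.split₀ (PySem.Str.lower query))).foldl
      (fun s t => (index.getD t []).foldl
        (fun s i => PySem.List.pySetD s i (PySem.List.pyGetD s i 0 + 1)) s)
      (List.replicate categories.length 0)
  let r : Int × Int := (PySem.List.enumerate scores 0).foldl
      (fun (acc : Int × Int) p => if p.2 > acc.2 then (p.1, p.2) else acc) (-1, 0)
  if r.2 > 0 then PySem.List.pyGetD categories r.1 "" else ""

-- ===== PRECONDITION & SPEC =====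
def Spec_keyword_backup_category (query : String) (categories : List String) (out : String) : Prop := out = keyword_backup_category_alt query categories
instance (query : String) (categories : List String) (out : String) : Decidable (Spec_keyword_backup_category query categories out) := by unfold Spec_keyword_backup_category; infer_instance

-- ===== CLAIM (what is proved, stated in full; the proofs are below) =====
def Claim_equal_keyword_backup_category : Prop := ∀ (query : String) (categories : List String), Dom_keyword_backup_category query categories → Spec_keyword_backup_category query categories (keyword_backup_category query categories)

-- ===== LEMMAS AND PROOFS =====

/-- The token set of a category. -/
def pvToks (c : String) : List String := PySem.Set.ofList (PySem.Str.split₀ (PySem.Str.lower c))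

/-- A's per-category score as a function. -/
def pvF (qs : List String) (c : String) : Int := (qs.countP (fun t => (pvToks c).contains t) : Int)

/-- Posting list of token t over categories cs with first index k. -/
def pvPost (t : String) : List String → Int → List Int
  | [], _ => []
  | c :: cs, k => (if t ∈ pvToks c then [k] else []) ++ pvPost t cs (k + 1)

/-- First argmax (head-preferring on ties) of `f` by value, default ("", 0). -/
def pvBestOf (f : String → Int) : List String → String × Int
  | [] => ("", 0)
  | c :: cs => let t := pvBestOf f cs; if t.2 > f c then t else (c, f c)

/-- First argmax by index over a score list, offset k, default (-1, 0). -/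
def pvBestIdx : List Int → Int → Int × Int
  | [], _ => (-1, 0)
  | s :: rest, k => let t := pvBestIdx rest (k + 1); if t.2 > s then t else (k, s)

theorem pvBestOf_nonneg (f : String → Int) (cs : List String) : 0 ≤ (pvBestOf f cs).2 := by
  induction cs with
  | nil => simp [pvBestOf]
  | cons c cs ih => simp only [pvBestOf]; split <;> omega

theorem pvBestIdx_nonneg (l : List Int) (k : Int) : 0 ≤ (pvBestIdx l k).2 := by
  induction l generalizing k with
  | nil => simp [pvBestIdx]
  | cons s rest ih => simp only [pvBestIdx]; have := ih (k+1); split <;> omega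

theorem pvFoldA (f : String → Int) (cs : List String) :
    ∀ (acc : String × Int), 0 ≤ acc.2 →
      cs.foldl (fun acc c => if f c > acc.2 then (c, f c) else acc) acc
        = if (pvBestOf f cs).2 > acc.2 then pvBestOf f cs else acc := by
  induction cs with
  | nil => intro acc h; simp [pvBestOf]; omega
  | cons c cs ih =>
    intro acc h
    have hb := pvBestOf_nonneg f cs
    simp only [List.foldl_cons, pvBestOf]
    by_cases h1 : f c > acc.2
    · rw [if_pos h1, ih (c, f c) (by omega)]
      by_cases h2 : (pvBestOf f cs).2 > f c
      · rw [if_pos (show (pvBestOf f cs).2 > f c from h2),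
          if_pos (show (pvBestOf f cs).2 > acc.2 by omega)]
      · rw [if_neg (show ¬ (pvBestOf f cs).2 > f c from h2),
          if_pos (show ((c, f c) : String × Int).2 > acc.2 from h1)]
    · rw [if_neg h1, ih acc h]
      by_cases h2 : (pvBestOf f cs).2 > f c
      · rw [if_pos h2]
      · rw [if_neg h2,
          if_neg (show ¬ ((c, f c) : String × Int).2 > acc.2 from h1),
          if_neg (show ¬ (pvBestOf f cs).2 > acc.2 by omega)]

theorem pvFoldB (l : List Int) :
    ∀ (k : Int) (acc : Int × Int), 0 ≤ acc.2 →
      (PySem.List.enumerate l k).foldl (fun (acc : Int × Int) p => if p.2 > acc.2 then (p.1, p.2) else acc) acc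
        = if (pvBestIdx l k).2 > acc.2 then pvBestIdx l k else acc := by
  induction l with
  | nil => intro k acc h; simp [pvBestIdx, PySem.List.enumerate_nil]; omega
  | cons s rest ih =>
    intro k acc h
    have hb := pvBestIdx_nonneg rest (k + 1)
    rw [PySem.List.enumerate_cons]
    simp only [List.foldl_cons, pvBestIdx]
    by_cases h1 : s > acc.2
    · rw [if_pos h1, ih (k + 1) (k, s) (by omega)]
      by_cases h2 : (pvBestIdx rest (k + 1)).2 > s
      · rw [if_pos (show (pvBestIdx rest (k+1)).2 > s from h2),
          if_pos (show (pvBestIdx rest (k+1)).2 > acc.2 by omega)]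
      · rw [if_neg (show ¬ (pvBestIdx rest (k+1)).2 > s from h2),
          if_pos (show ((k, s) : Int × Int).2 > acc.2 from h1)]
    · rw [if_neg h1, ih (k + 1) acc h]
      by_cases h2 : (pvBestIdx rest (k + 1)).2 > s
      · rw [if_pos h2]
      · rw [if_neg h2,
          if_neg (show ¬ ((k, s) : Int × Int).2 > acc.2 from h1),
          if_neg (show ¬ (pvBestIdx rest (k+1)).2 > acc.2 by omega)]

/-- The index-scan best matches the value-scan best. -/
theorem pvBestRel (f : String → Int) (cs : List String) :
    ∀ (k : Int),
    (pvBestIdx (cs.map f) k).2 = (pvBestOf f cs).2 ∧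
    ((pvBestOf f cs).2 > 0 → ∃ j : Nat, j < cs.length ∧
      (pvBestIdx (cs.map f) k).1 = k + (j : Int) ∧ cs.getD j "" = (pvBestOf f cs).1) := by
  induction cs with
  | nil => intro k; simp [pvBestIdx, pvBestOf]
  | cons c cs ih =>
    intro k
    obtain ⟨ih2, ih1⟩ := ih (k + 1)
    simp only [List.map_cons, pvBestIdx, pvBestOf]
    by_cases h2 : (pvBestOf f cs).2 > f c
    · rw [if_pos (ih2 ▸ h2), if_pos h2]
      refine ⟨ih2, fun hpos => ?_⟩
      obtain ⟨j, hj, hidx, hget⟩ := ih1 hpos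
      exact ⟨j + 1, by simpa using hj, by rw [hidx]; push_cast; ring, by simpa using hget⟩
    · rw [if_neg (ih2 ▸ h2), if_neg h2]
      exact ⟨rfl, fun _ => ⟨0, by simp⟩⟩

/-- Every element of a posting list lies in [k, k + length). -/
theorem pvPost_mem_bounds (t : String) (cs : List String) :
    ∀ (k : Int), ∀ x ∈ pvPost t cs k, k ≤ x ∧ x < k + (cs.length : Int) := by
  induction cs with
  | nil => intro k x hx; simp [pvPost] at hx
  | cons c cs ih =>
    intro k x hx
    simp only [pvPost, List.mem_append] at hx
    rcases hx with hx | hx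
    · have hx' : x = k := by by_cases h : t ∈ pvToks c <;> simp [h] at hx; omega
      subst hx'; constructor <;> [omega; (simp only [List.length_cons]; push_cast; omega)]
    · have := ih (k + 1) x hx
      simp only [List.length_cons]; push_cast; omega

/-- Occurrence count of index k + j in the posting list. -/
theorem pvPost_count (t : String) (cs : List String) :
    ∀ (k : Int) (j : Nat), j < cs.length →
      (pvPost t cs k).count (k + (j : Int)) = if t ∈ pvToks (cs.getD j "") then 1 else 0 := by
  induction cs with
  | nil => intro k j hj; simp at hj
  | cons c cs ih =>
    intro k j hj
    simp only [pvPost, List.count_append]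
    cases j with
    | zero =>
      have htail : (pvPost t cs (k + 1)).count (k + ((0 : Nat) : Int)) = 0 := by
        rw [List.count_eq_zero]
        intro hmem
        have := (pvPost_mem_bounds t cs (k + 1) _ hmem).1
        omega
      rw [htail]
      by_cases h : t ∈ pvToks c <;> simp [h]
    | succ j' =>
      have hhead : (if t ∈ pvToks c then [k] else []).count (k + ((j' + 1 : Nat) : Int)) = 0 := by
        by_cases h : t ∈ pvToks c
        · simp [h, List.count_singleton]
          omega
        · simp [h]
      rw [hhead]
      have : k + ((j' + 1 : Nat) : Int) = (k + 1) + (j' : Int) := by push_cast; ring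
      rw [this, ih (k + 1) j' (by simpa using hj)]
      simp

/-- Inner dict-building loop: appending k under every key of ts. -/
theorem pvInner (ts : List String) :
    ∀ (d : PySem.Dict String (List Int)) (k : Int) (t : String),
      (ts.foldl (fun d u => d.modify u [] (· ++ [k])) d).getD t []
        = d.getD t [] ++ List.replicate (ts.count t) k := by
  induction ts with
  | nil => intro d k t; simp
  | cons u ts ih =>
    intro d k t
    simp only [List.foldl_cons]
    rw [ih]
    rw [PySem.Dict.getD_modify]
    by_cases h : t = u
    · subst h
      simp [List.count_cons_self, List.replicate_succ, List.append_assoc]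
    · simp [h, Ne.symm h]

/-- The inverted index: lookup of t yields exactly its posting list. -/
theorem pvIndex (cs : List String) :
    ∀ (k : Int) (d : PySem.Dict String (List Int)) (t : String),
      ((PySem.List.enumerate cs k).foldl (fun d p =>
          (PySem.Set.ofList (PySem.Str.split₀ (PySem.Str.lower p.2))).foldl
            (fun d u => d.modify u [] (· ++ [p.1])) d) d).getD t []
        = d.getD t [] ++ pvPost t cs k := by
  induction cs with
  | nil => intro k d t; simp [PySem.List.enumerate_nil, pvPost]
  | cons c cs ih =>
    intro k d t
    rw [PySem.List.enumerate_cons]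
    simp only [List.foldl_cons]
    rw [ih, pvInner]
    have hnd : (pvToks c).Nodup := PySem.Set.nodup_ofList _
    show d.getD t [] ++ List.replicate ((pvToks c).count t) k ++ pvPost t cs (k + 1)
      = d.getD t [] ++ pvPost t (c :: cs) k
    by_cases h : t ∈ pvToks c
    · rw [List.count_eq_one_of_mem hnd h]
      simp [pvPost, h]
    · rw [List.count_eq_zero.mpr h]
      simp [pvPost, h]

/-- Bump loop preserves length. -/
theorem pvBumpLen (L : List Int) :
    ∀ (s : List Int),
      (L.foldl (fun s i => PySem.List.pySetD s i (PySem.List.pyGetD s i 0 + 1)) s).length = s.length := by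
  induction L with
  | nil => intro s; rfl
  | cons i L ih => intro s; simp only [List.foldl_cons]; rw [ih]; simp [pysem]

/-- Bump loop adds the occurrence count at each in-range position. -/
theorem pvBumpGet (L : List Int) :
    ∀ (s : List Int) (j : Nat), j < s.length → (∀ i ∈ L, 0 ≤ i ∧ i < (s.length : Int)) →
      (L.foldl (fun s i => PySem.List.pySetD s i (PySem.List.pyGetD s i 0 + 1)) s).getD j 0
        = s.getD j 0 + L.count ((j : Int)) := by
  induction L with
  | nil => intro s j hj _; simp
  | cons i L ih =>
    intro s j hj hrange
    obtain ⟨hi0, hilen⟩ := hrange i (List.mem_cons_self)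
    simp only [List.foldl_cons]
    rw [PySem.List.pySetD_of_nonneg _ _ hi0]
    have hlen : (s.set i.toNat (PySem.List.pyGetD s i 0 + 1)).length = s.length := by simp
    rw [ih _ j (by omega) (by rw [hlen]; exact fun x hx => hrange x (List.mem_cons_of_mem _ hx))]
    by_cases h : i = (j : Int)
    · subst h
      rw [List.count_cons_self, Int.toNat_natCast]
      rw [List.getD_eq_getElem _ _ (by simpa using hj)]
      simp only [PySem.List.pyGetD_natCast, List.getElem_set_self, List.getD_eq_getElem _ _ hj]
      push_cast
      ring
    · have hcnt : List.count ((j : Int)) (i :: L) = List.count ((j : Int)) L := by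
        simp [h]
      rw [hcnt]
      congr 1
      rw [List.getD_eq_getElem _ _ (by simpa using hj), List.getD_eq_getElem _ _ hj]
      simp [show i.toNat ≠ j by omega]

/-- A's per-category set-intersection score is pvF. -/
theorem pvScoreA (qs : List String) (cat : String) :
    PySem.Set.len (PySem.Set.inter qs (PySem.Set.ofList (PySem.Str.split₀ (PySem.Str.lower cat))))
      = pvF qs cat := by
  simp [PySem.Set.len, PySem.Set.inter, pvF, pvToks, List.countP_eq_length_filter]

/-- Scatter loop over the query tokens accumulates pvF at every position. -/
theorem pvScatter (cats : List String) (qs : List String) :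
    ∀ (s : List Int), s.length = cats.length →
      (qs.foldl (fun s t => (pvPost t cats 0).foldl
          (fun s i => PySem.List.pySetD s i (PySem.List.pyGetD s i 0 + 1)) s) s).length = cats.length ∧
      ∀ j : Nat, j < cats.length →
        (qs.foldl (fun s t => (pvPost t cats 0).foldl
            (fun s i => PySem.List.pySetD s i (PySem.List.pyGetD s i 0 + 1)) s) s).getD j 0
          = s.getD j 0 + (qs.countP (fun t => (pvToks (cats.getD j "")).contains t) : Int) := by
  induction qs with
  | nil => intro s hs; simp [hs]
  | cons t qs ih =>
    intro s hs
    simp only [List.foldl_cons]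
    have hlen' : ((pvPost t cats 0).foldl
        (fun s i => PySem.List.pySetD s i (PySem.List.pyGetD s i 0 + 1)) s).length = cats.length := by
      rw [pvBumpLen]; exact hs
    obtain ⟨hl, hg⟩ := ih _ hlen'
    refine ⟨hl, fun j hj => ?_⟩
    rw [hg j hj]
    have hrange : ∀ i ∈ pvPost t cats 0, 0 ≤ i ∧ i < (s.length : Int) := by
      intro i hi
      have := pvPost_mem_bounds t cats 0 i hi
      rw [hs]; omega
    rw [pvBumpGet _ s j (by omega) hrange]
    have hcnt := pvPost_count t cats 0 j hj
    rw [zero_add] at hcnt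
    rw [hcnt]
    rw [List.countP_cons]
    by_cases hm : t ∈ pvToks (cats.getD j "")
    · have hp : (pvToks (cats.getD j "")).contains t = true := List.elem_eq_true_of_mem hm
      rw [if_pos hm, hp]
      simp only [if_pos trivial]
      push_cast
      ring
    · have hp : (pvToks (cats.getD j "")).contains t = false := by
        simp only [List.contains_eq_mem, decide_eq_false_iff_not]; exact hm
      rw [if_neg hm, hp]
      push_cast
      ring

set_option maxHeartbeats 2000000 in
-- ===== VERDICT (by name: the statement is the Claim_ definition above) =====
theorem keyword_backup_category_spec : Claim_equal_keyword_backup_category := by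
  intro query categories _
  unfold Spec_keyword_backup_category keyword_backup_category keyword_backup_category_alt
  simp only [pvScoreA]
  set qs : List String := PySem.Set.ofList (PySem.Str.split₀ (PySem.Str.lower query)) with hqs
  set f : String → Int := pvF qs with hf
  -- A side: the fold is the first value-argmax
  rw [pvFoldA f categories ("", 0) (by simp)]
  -- B side: the index lookups are the posting lists
  have hIdx : ∀ t : String,
      (((PySem.List.enumerate categories 0).foldl (fun d p =>
          (PySem.Set.ofList (PySem.Str.split₀ (PySem.Str.lower p.2))).foldl
            (fun d u => d.modify u [] (· ++ [p.1])) d) PySem.Dict.empty).getD t [])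
        = pvPost t categories 0 := by
    intro t
    rw [pvIndex]
    simp [PySem.Dict.getD_empty]
  simp only [hIdx]
  obtain ⟨hslen, hsget⟩ := pvScatter categories qs (List.replicate categories.length 0) (by simp)
  set scores : List Int := qs.foldl (fun s t => (pvPost t categories 0).foldl
      (fun s i => PySem.List.pySetD s i (PySem.List.pyGetD s i 0 + 1)) s)
      (List.replicate categories.length 0) with hscores
  have hmap : scores = categories.map f := by
    apply List.ext_getElem (by rw [hslen]; simp)
    intro j hj hj2
    have hjlt : j < categories.length := by simpa using hj2
    have h1 : scores[j] = scores.getD j 0 := (List.getD_eq_getElem scores 0 hj).symm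
    rw [h1, hsget j hjlt]
    simp only [List.getElem_map]
    rw [List.getD_eq_getElem _ _ (by simpa using hjlt), List.getElem_replicate]
    have hcat : categories.getD j "" = categories[j] := List.getD_eq_getElem categories "" hjlt
    have hfv : f categories[j] = (qs.countP (fun t => (pvToks categories[j]).contains t) : Int) := by
      rw [hf]; rfl
    rw [hcat, hfv]
    ring
  rw [pvFoldB scores 0 (-1, 0) (by norm_num)]
  rw [hmap]
  obtain ⟨hrel2, hrel1⟩ := pvBestRel f categories 0
  have hsnd : (((-1 : Int), (0 : Int)) : Int × Int).2 = 0 := rfl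
  have hsndA : (("", (0 : Int)) : String × Int).2 = 0 := rfl
  by_cases hpos : (pvBestOf f categories).2 > 0
  · obtain ⟨j, hjlt, hidx, hget⟩ := hrel1 hpos
    have hbA : (pvBestOf f categories).2 > (("", (0 : Int)) : String × Int).2 := by
      rw [hsndA]; exact hpos
    have hb : (pvBestIdx (List.map f categories) 0).2 > (((-1 : Int), (0 : Int)) : Int × Int).2 := by
      rw [hsnd, hrel2]; exact hpos
    rw [if_pos hbA, if_pos hpos, if_pos hb,
        if_pos (show (pvBestIdx (List.map f categories) 0).2 > 0 by rw [hrel2]; exact hpos),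
        hidx, zero_add, PySem.List.pyGetD_natCast]
    exact hget.symm
  · have hbA : ¬ (pvBestOf f categories).2 > (("", (0 : Int)) : String × Int).2 := by
      rw [hsndA]; exact hpos
    have hb : ¬ (pvBestIdx (List.map f categories) 0).2 > (((-1 : Int), (0 : Int)) : Int × Int).2 := by
      rw [hsnd, hrel2]; exact hpos
    rw [if_neg hbA, if_neg hb]
    norm_num
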